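-- pv_equiv track=rewrite | github.com/HWBroker/Info_UPC_N10 | S14/10_maxim_de_les_suma_de_les_columes_duna_matru/lib.py | maxim_suma_columnes
-- ===== SOURCE A (Python) =====
-- def maxim_suma_columnes(m):
--     s = []
--     sm = 0
--     c = 0
--
--     for i in range(len(m[0])):
--         s.append(0)
--         for j in range(len(m)):
--             s[i] += m[j][i]
--
--     for k in range(len(s)):
--         if s[k] > sm:
--             sm = s[k]
--             c = k
--
--     return sm, c
-- ===== SOURCE B (Python) =====
-- def maxim_suma_columnes(m):
--     sm = 0
--     c = 0
--     for i in range(len(m[0])):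
--         colsum = 0
--         for j in range(len(m)):
--             colsum += m[j][i]
--         if colsum > sm:
--             sm = colsum
--             c = i
--     return sm, c
-- ===== Notes on version B (the rewrite author's own statement) =====
-- stated objective: simpler
-- what changed: Fuses A's build-then-scan two-pass structure (materialize the list s of column sums, then scan it for the maximum) into a single pass over columns that compares each column sum against a running maximum, eliminating the intermediate list.
import Mathlib
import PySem

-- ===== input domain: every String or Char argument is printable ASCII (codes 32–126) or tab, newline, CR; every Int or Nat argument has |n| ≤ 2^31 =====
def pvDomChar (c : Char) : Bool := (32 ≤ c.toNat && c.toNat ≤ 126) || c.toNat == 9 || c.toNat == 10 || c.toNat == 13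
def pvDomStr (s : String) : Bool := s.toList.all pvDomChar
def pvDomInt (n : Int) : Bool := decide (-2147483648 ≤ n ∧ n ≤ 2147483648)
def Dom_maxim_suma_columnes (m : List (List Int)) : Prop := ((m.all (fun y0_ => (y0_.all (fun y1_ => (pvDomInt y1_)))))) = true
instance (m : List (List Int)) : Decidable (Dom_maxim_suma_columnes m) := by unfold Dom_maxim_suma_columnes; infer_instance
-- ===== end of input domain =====

-- B fuses A's build-then-scan two passes into one pass over columns with a running maximum (simpler: no intermediate list).

-- inner loop 'for j in range(len(m)): … += m[j][i]' — shared verbatim by both Pythons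
def pvColSum (m : List (List Int)) (i : Int) : Int :=
  (PySem.List.pyRange 0 m.length 1).foldl
    (fun acc j => acc + PySem.List.pyGetD (PySem.List.pyGetD m j []) i 0) 0

-- ===== PORT A =====
def maxim_suma_columnes (m : List (List Int)) : Int × Int :=
  let s : List Int :=
    (PySem.List.pyRange 0 (PySem.List.pyGetD m 0 []).length 1).foldl
      (fun s i => s ++ [pvColSum m i]) []
  (PySem.List.pyRange 0 s.length 1).foldl
    (fun (p : Int × Int) k =>
      if PySem.List.pyGetD s k 0 > p.1 then (PySem.List.pyGetD s k 0, k) else p)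
    (0, 0)

-- ===== PORT B =====
def maxim_suma_columnes_alt (m : List (List Int)) : Int × Int :=
  (PySem.List.pyRange 0 (PySem.List.pyGetD m 0 []).length 1).foldl
    (fun (p : Int × Int) i =>
      let colsum := pvColSum m i
      if colsum > p.1 then (colsum, i) else p)
    (0, 0)

-- ===== PRECONDITION & SPEC =====
-- Pre_ excludes exactly the inputs where Python A raises IndexError: empty m (m[0]) and
-- rows shorter than row 0 (m[j][i]); Python B raises on the same inputs.
def Pre_maxim_suma_columnes (m : List (List Int)) : Prop :=
  m ≠ [] ∧ ∀ row ∈ m, m.headI.length ≤ row.length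
instance (m : List (List Int)) : Decidable (Pre_maxim_suma_columnes m) := by
  unfold Pre_maxim_suma_columnes; infer_instance
def pvWitness_maxim_suma_columnes : List (List Int) := [[1, 2], [3, 4]]

def Spec_maxim_suma_columnes (m : List (List Int)) (out : Int × Int) : Prop := out = maxim_suma_columnes_alt m
instance (m : List (List Int)) (out : Int × Int) : Decidable (Spec_maxim_suma_columnes m out) := by unfold Spec_maxim_suma_columnes; infer_instance

-- ===== CLAIM (what is proved, stated in full; the proofs are below) =====
def Claim_equal_maxim_suma_columnes : Prop := ∀ (m : List (List Int)), Dom_maxim_suma_columnes m → Pre_maxim_suma_columnes m → Spec_maxim_suma_columnes m (maxim_suma_columnes m)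

-- ===== LEMMAS AND PROOFS =====

theorem maxim_suma_columnes_eq (m : List (List Int)) :
    maxim_suma_columnes m = maxim_suma_columnes_alt m := by
  unfold maxim_suma_columnes maxim_suma_columnes_alt
  rw [PySem.List.foldl_append_singleton_eq_map]
  dsimp only
  simp only [List.nil_append, List.length_map, PySem.List.length_pyRange_one, Int.sub_zero,
    Int.toNat_natCast]
  apply PySem.List.foldl_congr_mem
  intro p k hk
  rw [PySem.List.mem_pyRange_one] at hk
  rw [PySem.List.pyGetD_map_pyRange_of_nonneg _ _ _ _ hk.1 hk.2]

-- ===== VERDICT (by name: the statement is the Claim_ definition above) =====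
theorem maxim_suma_columnes_spec : Claim_equal_maxim_suma_columnes := by
  intro m _ _
  unfold Spec_maxim_suma_columnes
  exact maxim_suma_columnes_eq m
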